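-- pv_equiv track=rewrite | github.com/Efekan-code/biotech-turkey-map | extract-data.py | build_province_texts
-- ===== SOURCE A (Python) =====
-- def build_province_texts(tagged):
--     """
--     PDF table structure: province name appears in middle of its topic block.
--
--     Correct assignment:
--     - Text BEFORE province[0]'s name  → province[0] (pre-name topics)
--     - Text AFTER province[i]'s name, BEFORE province[i+1]'s name → province[i] (post-name topics)
--
--     So province[i]'s full text = (its pre-name block) only if i==0,
--     plus its post-name block (text after its name until next province name).
--     """
--     prov_positions = [(i, prov, rem)
--                       for i, (typ, prov, rem) in enumerate(tagged)
--                       if typ == 'province']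
--
--     def get_text_range(start, end):
--         return [tagged[i][2] for i in range(start, end) if tagged[i][0] == 'text']
--
--     province_texts = {}
--
--     for idx, (pos, prov_name, remainder) in enumerate(prov_positions):
--         lines = []
--
--         # Only first province in PDF gets the pre-name text
--         if idx == 0:
--             lines.extend(get_text_range(0, pos))
--
--         # Add remainder from province name line (e.g., "Ardahan Entegre Kaz...")
--         if remainder:
--             lines.append(remainder)
--
--         # Add all text after this province until the next province name
--         next_pos = prov_positions[idx + 1][0] if idx + 1 < len(prov_positions) else len(tagged)
--         lines.extend(get_text_range(pos + 1, next_pos))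
--
--         if prov_name not in province_texts:
--             province_texts[prov_name] = []
--         province_texts[prov_name].extend(lines)
--
--     return province_texts
-- ===== SOURCE B (Python) =====
-- def build_province_texts(tagged):
--     province_texts = {}
--     pre_buffer = []
--     current = None
--     for typ, name, rem in tagged:
--         if typ == 'province':
--             lines = province_texts.setdefault(name, [])
--             if current is None:
--                 lines.extend(pre_buffer)
--             if rem:
--                 lines.append(rem)
--             current = name
--         elif typ == 'text':
--             if current is None:
--                 pre_buffer.append(rem)
--             else:
--                 province_texts[current].append(rem)
--     return province_texts
-- ===== Notes on version B (the rewrite author's own statement) =====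
-- stated objective: simpler
-- what changed: A enumerates the input twice to build an index list of province positions and re-scans index ranges of the input for each province; B is a single streaming pass over the tagged lines that routes each text line to a pre-name buffer or to the current province as it goes.
import Mathlib
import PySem

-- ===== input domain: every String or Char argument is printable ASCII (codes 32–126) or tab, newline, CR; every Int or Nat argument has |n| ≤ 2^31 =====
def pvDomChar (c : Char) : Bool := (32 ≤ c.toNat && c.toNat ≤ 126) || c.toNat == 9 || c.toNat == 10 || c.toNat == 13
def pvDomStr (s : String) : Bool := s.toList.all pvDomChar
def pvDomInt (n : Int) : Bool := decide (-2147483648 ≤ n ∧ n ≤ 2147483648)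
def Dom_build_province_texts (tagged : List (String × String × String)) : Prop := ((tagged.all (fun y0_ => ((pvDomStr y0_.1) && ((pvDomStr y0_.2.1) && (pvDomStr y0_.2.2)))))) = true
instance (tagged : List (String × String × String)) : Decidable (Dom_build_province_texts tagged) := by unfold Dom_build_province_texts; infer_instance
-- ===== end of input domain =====

-- B replaces A's index/enumerate bookkeeping and repeated range re-scans by a single
-- streaming pass with a current-province accumulator (objective: simpler/alternative).

-- ===== PORT A =====
-- helper get_text_range of A (closes over tagged; start/stop are Python ints)
def pvGetTextRange (tagged : List (String × String × String)) (start stop : Int) : List String :=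
  (PySem.List.pyRange start stop).filterMap (fun i =>
    if (PySem.List.pyGetD tagged i ("", "", "")).1 == "text"
    then some (PySem.List.pyGetD tagged i ("", "", "")).2.2 else none)

def build_province_texts (tagged : List (String × String × String)) : List (String × List String) :=
  let prov_positions := (PySem.List.enumerate tagged).filterMap
    (fun p => if p.2.1 == "province" then some (p.1, p.2.2.1, p.2.2.2) else none)
  let d := (PySem.List.enumerate prov_positions).foldl (fun d q =>
    let idx := q.1
    let pos := q.2.1
    let prov_name := q.2.2.1
    let remainder := q.2.2.2
    let lines : List String := []
    let lines := if idx == 0 then lines ++ pvGetTextRange tagged 0 pos else lines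
    let lines := if remainder ≠ "" then lines ++ [remainder] else lines
    let next_pos : Int := if idx + 1 < (prov_positions.length : Int)
        then (PySem.List.pyGetD prov_positions (idx + 1) (0, "", "")).1
        else (tagged.length : Int)
    let lines := lines ++ pvGetTextRange tagged (pos + 1) next_pos
    let d := if d.contains prov_name = false then d.insert prov_name ([] : List String) else d
    d.modify prov_name [] (fun l => l ++ lines)
  ) PySem.Dict.empty
  d.items

-- ===== PORT B =====
def build_province_texts_alt (tagged : List (String × String × String)) : List (String × List String) :=
  let s := tagged.foldl (fun (s : PySem.Dict String (List String) × List String × Option String) x =>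
      let d := s.1
      let pre_buffer := s.2.1
      let current := s.2.2
      if x.1 == "province" then
        let d := d.setdefault x.2.1 []
        let d := if current = none then d.modify x.2.1 [] (fun l => l ++ pre_buffer) else d
        let d := if x.2.2 ≠ "" then d.modify x.2.1 [] (fun l => l ++ [x.2.2]) else d
        (d, pre_buffer, some x.2.1)
      else if x.1 == "text" then
        match current with
        | none => (d, pre_buffer ++ [x.2.2], none)
        | some c => (d.modify c [] (fun l => l ++ [x.2.2]), pre_buffer, some c)
      else s)
    (PySem.Dict.empty, ([] : List String), (none : Option String))
  s.1.items

-- ===== PRECONDITION & SPEC =====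
def Spec_build_province_texts (tagged : List (String × String × String)) (out : List (String × List String)) : Prop := out = build_province_texts_alt tagged
instance (tagged : List (String × String × String)) (out : List (String × List String)) : Decidable (Spec_build_province_texts tagged out) := by unfold Spec_build_province_texts; infer_instance

-- ===== CLAIM (what is proved, stated in full; the proofs are below) =====
def Claim_equal_build_province_texts : Prop := ∀ (tagged : List (String × String × String)), Dom_build_province_texts tagged → Spec_build_province_texts tagged (build_province_texts tagged)

-- ===== LEMMAS AND PROOFS =====

-- proof-side names for the two fold bodies (identical terms to the ports')
def pvStepA (tagged : List (String × String × String))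
    (prov_positions : List (Int × String × String))
    (d : PySem.Dict String (List String)) (q : Int × Int × String × String) :
    PySem.Dict String (List String) :=
  let idx := q.1
  let pos := q.2.1
  let prov_name := q.2.2.1
  let remainder := q.2.2.2
  let lines : List String := []
  let lines := if idx == 0 then lines ++ pvGetTextRange tagged 0 pos else lines
  let lines := if remainder ≠ "" then lines ++ [remainder] else lines
  let next_pos : Int := if idx + 1 < (prov_positions.length : Int)
      then (PySem.List.pyGetD prov_positions (idx + 1) (0, "", "")).1
      else (tagged.length : Int)
  let lines := lines ++ pvGetTextRange tagged (pos + 1) next_pos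
  let d := if d.contains prov_name = false then d.insert prov_name ([] : List String) else d
  d.modify prov_name [] (fun l => l ++ lines)

def pvPP (tagged : List (String × String × String)) : List (Int × String × String) :=
  (PySem.List.enumerate tagged).filterMap
    (fun p => if p.2.1 == "province" then some (p.1, p.2.2.1, p.2.2.2) else none)

def pvStepB (s : PySem.Dict String (List String) × List String × Option String)
    (x : String × String × String) :
    PySem.Dict String (List String) × List String × Option String :=
  let d := s.1
  let pre_buffer := s.2.1
  let current := s.2.2
  if x.1 == "province" then
    let d := d.setdefault x.2.1 []
    let d := if current = none then d.modify x.2.1 [] (fun l => l ++ pre_buffer) else d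
    let d := if x.2.2 ≠ "" then d.modify x.2.1 [] (fun l => l ++ [x.2.2]) else d
    (d, pre_buffer, some x.2.1)
  else if x.1 == "text" then
    match current with
    | none => (d, pre_buffer ++ [x.2.2], none)
    | some c => (d.modify c [] (fun l => l ++ [x.2.2]), pre_buffer, some c)
  else s

theorem pvA_unfold (tagged : List (String × String × String)) :
    build_province_texts tagged =
      ((PySem.List.enumerate (pvPP tagged)).foldl (pvStepA tagged (pvPP tagged)) PySem.Dict.empty).items := rfl

theorem pvB_unfold (tagged : List (String × String × String)) :
    build_province_texts_alt tagged =
      ((tagged.foldl pvStepB (PySem.Dict.empty, ([] : List String), (none : Option String))).1).items := rfl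

-- the common model
def pvRif (r : String) : List String := if r ≠ "" then [r] else []

def pvBuild1 (d : PySem.Dict String (List String)) (g : String × String × List String) :
    PySem.Dict String (List String) :=
  (if d.contains g.1 = false then d.insert g.1 ([] : List String) else d).modify g.1 []
    (fun l => l ++ (pvRif g.2.1 ++ g.2.2))

def pvBuildG (pre : List String) (gs : List (String × String × List String)) :
    PySem.Dict String (List String) :=
  match gs with
  | [] => PySem.Dict.empty
  | g :: rest => rest.foldl pvBuild1 (PySem.Dict.empty.insert g.1 (pre ++ pvRif g.2.1 ++ g.2.2))

def pvGroups : List (String × String × String) → List String × List (String × String × List String)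
  | [] => ([], [])
  | (t, n, r) :: xs =>
    let pg := pvGroups xs
    if t = "province" then ([], (n, r, pg.1) :: pg.2)
    else if t = "text" then (r :: pg.1, pg.2)
    else pg

-- text extraction
def pvTextOf (x : String × String × String) : Option String :=
  if x.1 == "text" then some x.2.2 else none

-- Nat-indexed province positions
def pvPPN (s : Nat) : List (String × String × String) → List (Nat × String × String)
  | [] => []
  | x :: xs => if x.1 == "province" then (s, x.2.1, x.2.2) :: pvPPN (s + 1) xs else pvPPN (s + 1) xs

def pvNext (tagged : List (String × String × String)) : List (Nat × String × String) → Nat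
  | [] => tagged.length
  | g :: _ => g.1

def pvGView (tagged : List (String × String × String)) :
    List (Nat × String × String) → List (String × String × List String)
  | [] => []
  | g :: rest =>
    (g.2.1, g.2.2, ((tagged.take (pvNext tagged rest)).drop (g.1 + 1)).filterMap pvTextOf)
      :: pvGView tagged rest

def pvCast (g : Nat × String × String) : Int × String × String := ((g.1 : Int), g.2)

-- ===== Dict helper lemmas =====

theorem pv_dict_eq (d1 d2 : PySem.Dict String (List String))
    (h1 : d1.keys.Nodup) (h2 : d2.keys.Nodup) (hk : d1.keys = d2.keys)
    (hv : ∀ k, d1.getD k [] = d2.getD k []) : d1 = d2 := by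
  apply PySem.Dict.ext
  rw [PySem.Dict.items_eq_map_keys d1 h1 [], PySem.Dict.items_eq_map_keys d2 h2 [], hk]
  exact List.map_congr_left (fun k _ => by rw [hv k])

theorem pv_nodup_modify (d : PySem.Dict String (List String)) (k : String) (f : List String → List String)
    (h : d.keys.Nodup) : (d.modify k [] f).keys.Nodup := by
  rw [PySem.Dict.keys_modify]
  exact PySem.Dict.nodup_keys_insert _ _ _ h

theorem pv_keys_modify (d : PySem.Dict String (List String)) (k : String) (f : List String → List String) :
    (d.modify k [] f).keys = (d.insert k (f (d.getD k []))).keys := PySem.Dict.keys_modify d k [] f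

theorem pv_modify_nil (d : PySem.Dict String (List String)) (c : String)
    (hnd : d.keys.Nodup) (hc : d.contains c = true) :
    d.modify c [] (fun l => l ++ []) = d := by
  apply pv_dict_eq _ _ (pv_nodup_modify _ _ _ hnd) hnd
  · rw [pv_keys_modify, PySem.Dict.keys_insert_of_contains _ _ hc]
  · intro k
    rw [PySem.Dict.getD_modify]
    split <;> simp_all

theorem pv_modify_modify (d : PySem.Dict String (List String)) (c : String) (a b : List String)
    (hnd : d.keys.Nodup) :
    (d.modify c [] (fun l => l ++ a)).modify c [] (fun l => l ++ b)
      = d.modify c [] (fun l => l ++ (a ++ b)) := by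
  apply pv_dict_eq _ _ (pv_nodup_modify _ _ _ (pv_nodup_modify _ _ _ hnd)) (pv_nodup_modify _ _ _ hnd)
  · have hcm : (d.modify c [] (fun l => l ++ a)).contains c = true := by
      rw [PySem.Dict.contains_modify]; simp
    rw [pv_keys_modify (d.modify c [] (fun l => l ++ a)) c (fun l => l ++ b),
      PySem.Dict.keys_insert_of_contains _ _ hcm,
      pv_keys_modify d c (fun l => l ++ a), pv_keys_modify d c (fun l => l ++ (a ++ b))]
    by_cases hc : d.contains c = true
    · rw [PySem.Dict.keys_insert_of_contains _ _ hc, PySem.Dict.keys_insert_of_contains _ _ hc]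
    · rw [PySem.Dict.keys_insert_of_not_contains _ _ (by simp_all),
        PySem.Dict.keys_insert_of_not_contains _ _ (by simp_all)]
  · intro k
    simp only [PySem.Dict.getD_modify]
    by_cases hk : k = c <;> simp [hk, List.append_assoc]

theorem pv_insert_modify (d : PySem.Dict String (List String)) (k : String) (v p : List String)
    (hnd : d.keys.Nodup) :
    (d.insert k v).modify k [] (fun l => l ++ p) = d.insert k (v ++ p) := by
  apply pv_dict_eq _ _ (pv_nodup_modify _ _ _ (PySem.Dict.nodup_keys_insert _ _ _ hnd))
    (PySem.Dict.nodup_keys_insert _ _ _ hnd)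
  · rw [pv_keys_modify]
    by_cases hc : d.contains k = true
    · rw [PySem.Dict.keys_insert_of_contains, PySem.Dict.keys_insert_of_contains _ _ hc,
        PySem.Dict.keys_insert_of_contains _ _ hc]
      rw [PySem.Dict.contains_insert]; simp
    · rw [PySem.Dict.keys_insert_of_contains, PySem.Dict.keys_insert_of_not_contains _ _ (by simp_all),
        PySem.Dict.keys_insert_of_not_contains _ _ (by simp_all)]
      rw [PySem.Dict.contains_insert]; simp
  · intro j
    rw [PySem.Dict.getD_modify, PySem.Dict.getD_insert, PySem.Dict.getD_insert, PySem.Dict.getD_insert]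
    split <;> simp

-- ===== B side =====

theorem pvLB1 (xs : List (String × String × String)) :
    ∀ (d : PySem.Dict String (List String)) (pre0 : List String) (c : String),
    d.keys.Nodup → d.contains c = true →
    (xs.foldl pvStepB (d, pre0, some c)).1
      = ((pvGroups xs).2).foldl pvBuild1 (d.modify c [] (fun l => l ++ (pvGroups xs).1)) := by
  induction xs with
  | nil =>
    intro d pre0 c hnd hc
    simp only [List.foldl_nil]
    exact (pv_modify_nil d c hnd hc).symm
  | cons x xs ih =>
    intro d pre0 c hnd hc
    obtain ⟨t, n, r⟩ := x
    by_cases ht : t = "province"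
    · subst ht
      have hsd : PySem.Dict.setdefault d n [] = if d.contains n = false then d.insert n [] else d := by
        by_cases hn : d.contains n = true
        · rw [PySem.Dict.setdefault_of_contains _ _ hn]; simp [hn]
        · rw [PySem.Dict.setdefault_of_not_contains _ _ (by simp_all)]; simp_all
      have hsdnd : (PySem.Dict.setdefault d n []).keys.Nodup := by
        rw [hsd]; split
        · exact PySem.Dict.nodup_keys_insert _ _ _ hnd
        · exact hnd
      have hsdc : (PySem.Dict.setdefault d n []).contains n = true := by
        rw [hsd]; split
        · exact PySem.Dict.contains_insert_self _ _ _
        · simp_all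
      have hg : pvGroups (("province", n, r) :: xs)
          = ([], (n, r, (pvGroups xs).1) :: (pvGroups xs).2) := by simp [pvGroups]
      by_cases hr : r ≠ ""
      · have hstep : pvStepB (d, pre0, some c) ("province", n, r)
            = ((d.setdefault n []).modify n [] (fun l => l ++ [r]), pre0, some n) := by
          simp [pvStepB, hr]
        rw [List.foldl_cons, hstep,
          ih _ pre0 n (pv_nodup_modify _ _ _ hsdnd) (by rw [PySem.Dict.contains_modify]; simp),
          pv_modify_modify _ _ _ _ hsdnd, hg, List.foldl_cons, pv_modify_nil d c hnd hc]
        unfold pvBuild1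
        rw [← hsd]
        simp [pvRif, hr]
      · have hr' : r = "" := by simpa using hr
        have hstep : pvStepB (d, pre0, some c) ("province", n, r)
            = (d.setdefault n [], pre0, some n) := by
          simp [pvStepB, hr']
        rw [List.foldl_cons, hstep, ih _ pre0 n hsdnd hsdc, hg, List.foldl_cons,
          pv_modify_nil d c hnd hc]
        unfold pvBuild1
        rw [← hsd]
        simp [pvRif, hr']
    · by_cases ht2 : t = "text"
      · subst ht2
        have hg : pvGroups (("text", n, r) :: xs)
            = (r :: (pvGroups xs).1, (pvGroups xs).2) := by simp [pvGroups]
        have hstep : pvStepB (d, pre0, some c) ("text", n, r)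
            = (d.modify c [] (fun l => l ++ [r]), pre0, some c) := by
          simp [pvStepB]
        rw [List.foldl_cons, hstep,
          ih _ pre0 c (pv_nodup_modify _ _ _ hnd) (by rw [PySem.Dict.contains_modify]; simp [hc]),
          pv_modify_modify _ _ _ _ hnd, hg]
        simp
      · have hg : pvGroups ((t, n, r) :: xs) = pvGroups xs := by simp [pvGroups, ht, ht2]
        have hstep : pvStepB (d, pre0, some c) (t, n, r) = (d, pre0, some c) := by
          simp [pvStepB, ht, ht2]
        rw [List.foldl_cons, hstep, ih _ pre0 c hnd hc, hg]

theorem pvLB0 (xs : List (String × String × String)) :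
    ∀ (pre : List String),
    (xs.foldl pvStepB (PySem.Dict.empty, pre, none)).1
      = pvBuildG (pre ++ (pvGroups xs).1) (pvGroups xs).2 := by
  induction xs with
  | nil => intro pre; simp [pvGroups, pvBuildG]
  | cons x xs ih =>
    intro pre
    obtain ⟨t, n, r⟩ := x
    by_cases ht : t = "province"
    · subst ht
      have hemp : (PySem.Dict.empty : PySem.Dict String (List String)).setdefault n [] =
          PySem.Dict.empty.insert n [] :=
        PySem.Dict.setdefault_of_not_contains _ _ (PySem.Dict.contains_empty n)
      have hd2 : ∀ v : List String,
          ((PySem.Dict.empty : PySem.Dict String (List String)).insert n v).keys.Nodup := fun v =>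
        PySem.Dict.nodup_keys_insert _ _ _ PySem.Dict.nodup_keys_empty
      have hg : pvGroups (("province", n, r) :: xs)
          = ([], (n, r, (pvGroups xs).1) :: (pvGroups xs).2) := by simp [pvGroups]
      by_cases hr : r ≠ ""
      · have hstep : pvStepB (PySem.Dict.empty, pre, none) ("province", n, r)
            = (PySem.Dict.empty.insert n (pre ++ [r]), pre, some n) := by
          simp [pvStepB, hr, hemp, pv_insert_modify _ _ _ _ PySem.Dict.nodup_keys_empty]
        rw [List.foldl_cons, hstep,
          pvLB1 xs _ pre n (hd2 _) (PySem.Dict.contains_insert_self _ _ _),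
          pv_insert_modify _ _ _ _ PySem.Dict.nodup_keys_empty, hg]
        simp only [pvBuildG]
        simp [pvRif, hr, List.append_assoc]
      · have hr' : r = "" := by simpa using hr
        have hstep : pvStepB (PySem.Dict.empty, pre, none) ("province", n, r)
            = (PySem.Dict.empty.insert n pre, pre, some n) := by
          simp [pvStepB, hr', hemp, pv_insert_modify _ _ _ _ PySem.Dict.nodup_keys_empty]
        rw [List.foldl_cons, hstep,
          pvLB1 xs _ pre n (hd2 _) (PySem.Dict.contains_insert_self _ _ _),
          pv_insert_modify _ _ _ _ PySem.Dict.nodup_keys_empty, hg]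
        simp only [pvBuildG]
        simp [pvRif, hr']
    · by_cases ht2 : t = "text"
      · subst ht2
        have hg : pvGroups (("text", n, r) :: xs)
            = (r :: (pvGroups xs).1, (pvGroups xs).2) := by simp [pvGroups]
        have hstep : pvStepB (PySem.Dict.empty, pre, none) ("text", n, r)
            = (PySem.Dict.empty, pre ++ [r], none) := by
          simp [pvStepB]
        rw [List.foldl_cons, hstep, ih (pre ++ [r]), hg]
        simp [List.append_assoc]
      · have hg : pvGroups ((t, n, r) :: xs) = pvGroups xs := by simp [pvGroups, ht, ht2]
        have hstep : pvStepB (PySem.Dict.empty, pre, none) (t, n, r)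
            = (PySem.Dict.empty, pre, none) := by
          simp [pvStepB, ht, ht2]
        rw [List.foldl_cons, hstep, ih pre, hg]

-- ===== text-range characterisation =====

theorem pvTR (tagged : List (String × String × String)) (a b : Nat) (hb : b ≤ tagged.length) :
    pvGetTextRange tagged (a : Int) (b : Int) = ((tagged.take b).drop a).filterMap pvTextOf := by
  have key : ∀ (n a : Nat), b ≤ a + n →
      pvGetTextRange tagged (a : Int) (b : Int) = ((tagged.take b).drop a).filterMap pvTextOf := by
    intro n
    induction n with
    | zero =>
      intro a ha
      unfold pvGetTextRange
      rw [PySem.List.pyRange_one_eq_nil (by exact_mod_cast (by omega : b ≤ a))]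
      rw [List.drop_eq_nil_of_le (by rw [List.length_take]; omega)]
      simp
    | succ n ihn =>
      intro a ha
      by_cases hab : b ≤ a
      · unfold pvGetTextRange
        rw [PySem.List.pyRange_one_eq_nil (by exact_mod_cast hab)]
        rw [List.drop_eq_nil_of_le (by rw [List.length_take]; omega)]
        simp
      · have hab' : a < b := by omega
        have halen : a < tagged.length := by omega
        have hget : PySem.List.pyGetD tagged ((a : Nat) : Int) ("", "", "") = tagged[a] := by
          rw [PySem.List.pyGetD_natCast]
          exact List.getD_eq_getElem _ _ halen
        have hdrop : (tagged.take b).drop a = tagged[a] :: (tagged.take b).drop (a + 1) := by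
          rw [List.drop_eq_getElem_cons (by rw [List.length_take]; omega)]
          congr 1
          simp [List.getElem_take]
        have hrec := ihn (a + 1) (by omega)
        unfold pvGetTextRange at hrec ⊢
        rw [PySem.List.pyRange_one_cons (by exact_mod_cast hab'), hdrop]
        simp only [List.filterMap_cons, hget]
        rw [show ((a : Int) + 1) = (((a + 1 : Nat)) : Int) by push_cast; ring, hrec]
        simp [pvTextOf]
  exact key b a (by omega)

-- ===== province-position structure =====

theorem pvPP_cast (xs : List (String × String × String)) : ∀ (s : Nat),
    (PySem.List.enumerate xs (s : Int)).filterMap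
      (fun p => if p.2.1 == "province" then some (p.1, p.2.2.1, p.2.2.2) else none)
      = (pvPPN s xs).map pvCast := by
  induction xs with
  | nil => intro s; simp [PySem.List.enumerate_nil, pvPPN]
  | cons x xs ih =>
    intro s
    rw [PySem.List.enumerate_cons, List.filterMap_cons,
      show ((s : Int) + 1) = (((s + 1 : Nat)) : Int) by push_cast; ring, ih (s + 1)]
    by_cases hx : x.1 = "province"
    · simp [pvPPN, hx, pvCast]
    · simp [pvPPN, hx]

theorem pvPPN_lt (xs : List (String × String × String)) : ∀ (s : Nat) (g : Nat × String × String),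
    g ∈ pvPPN s xs → g.1 < s + xs.length := by
  induction xs with
  | nil => intro s g hg; simp [pvPPN] at hg
  | cons x xs ih =>
    intro s g hg
    by_cases hx : x.1 = "province"
    · simp only [pvPPN, hx, beq_self_eq_true, if_true, List.mem_cons] at hg
      rcases hg with h | h
      · subst h; simp
      · have := ih (s + 1) g h; simp; omega
    · simp only [pvPPN, beq_iff_eq, hx, if_false] at hg
      have := ih (s + 1) g hg; simp; omega

theorem pvPPN_shift (xs : List (String × String × String)) : ∀ (s : Nat),
    pvPPN (s + 1) xs = (pvPPN s xs).map (fun g => (g.1 + 1, g.2)) := by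
  induction xs with
  | nil => intro s; simp [pvPPN]
  | cons x xs ih =>
    intro s
    by_cases hx : x.1 = "province" <;> simp [pvPPN, hx, ih (s + 1)]

theorem pvNext_shift (x : String × String × String) (xs : List (String × String × String))
    (pp : List (Nat × String × String)) :
    pvNext (x :: xs) (pp.map (fun g => (g.1 + 1, g.2))) = pvNext xs pp + 1 := by
  cases pp <;> simp [pvNext]

theorem pvGView_shift (x : String × String × String) (xs : List (String × String × String)) :
    ∀ (pp : List (Nat × String × String)),
    pvGView (x :: xs) (pp.map (fun g => (g.1 + 1, g.2))) = pvGView xs pp := by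
  intro pp
  induction pp with
  | nil => simp [pvGView]
  | cons g pp ih =>
    simp only [List.map_cons, pvGView, pvNext_shift, List.take_succ_cons, List.drop_succ_cons]
    rw [ih]

-- groups ↔ positions correspondence
theorem pvGroups_eq (tagged : List (String × String × String)) :
    pvGroups tagged
      = (((tagged.take (pvNext tagged (pvPPN 0 tagged))).filterMap pvTextOf),
         pvGView tagged (pvPPN 0 tagged)) := by
  induction tagged with
  | nil => simp [pvGroups, pvPPN, pvGView, pvNext]
  | cons x xs ih =>
    obtain ⟨t, n, r⟩ := x
    by_cases ht : t = "province"
    · subst ht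
      have hpp : pvPPN 0 (("province", n, r) :: xs)
          = (0, n, r) :: (pvPPN 0 xs).map (fun g => (g.1 + 1, g.2)) := by
        simp [pvPPN, pvPPN_shift xs 0]
      have hL : pvGroups (("province", n, r) :: xs)
          = ([], (n, r, (pvGroups xs).1) :: (pvGroups xs).2) := by simp [pvGroups]
      rw [hpp, hL, ih]
      simp only [Prod.mk.injEq]
      refine ⟨by simp [pvNext], ?_⟩
      simp only [pvGView]
      rw [pvNext_shift ("province", n, r) xs (pvPPN 0 xs),
        pvGView_shift ("province", n, r) xs (pvPPN 0 xs)]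
      simp [List.take_succ_cons]
    · by_cases ht2 : t = "text"
      · subst ht2
        have hpp : pvPPN 0 (("text", n, r) :: xs)
            = (pvPPN 0 xs).map (fun g => (g.1 + 1, g.2)) := by
          simp [pvPPN, pvPPN_shift xs 0]
        have hL : pvGroups (("text", n, r) :: xs)
            = (r :: (pvGroups xs).1, (pvGroups xs).2) := by simp [pvGroups]
        rw [hpp, hL, ih]
        simp only [Prod.mk.injEq]
        refine ⟨?_, pvGView_shift ("text", n, r) xs (pvPPN 0 xs) |>.symm⟩
        rw [pvNext_shift ("text", n, r) xs (pvPPN 0 xs)]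
        simp [List.take_succ_cons, pvTextOf]
      · have hpp : pvPPN 0 ((t, n, r) :: xs)
            = (pvPPN 0 xs).map (fun g => (g.1 + 1, g.2)) := by
          simp [pvPPN, ht, pvPPN_shift xs 0]
        have hL : pvGroups ((t, n, r) :: xs) = pvGroups xs := by simp [pvGroups, ht, ht2]
        rw [hpp, hL, ih]
        simp only [Prod.mk.injEq]
        refine ⟨?_, pvGView_shift (t, n, r) xs (pvPPN 0 xs) |>.symm⟩
        rw [pvNext_shift (t, n, r) xs (pvPPN 0 xs)]
        simp [List.take_succ_cons, pvTextOf, ht2]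

-- ===== A side =====

theorem pvLA1 (tagged : List (String × String × String))
    (ppN : List (Nat × String × String)) (hppN : pvPPN 0 tagged = ppN) :
    ∀ (rest front : List (Nat × String × String)) (d : PySem.Dict String (List String)),
    ppN = front ++ rest → 1 ≤ front.length →
    ((PySem.List.enumerate (rest.map pvCast) (front.length : Int)).foldl
        (pvStepA tagged (ppN.map pvCast)) d)
      = (pvGView tagged rest).foldl pvBuild1 d := by
  intro rest
  induction rest with
  | nil => intro front d _ _; simp [PySem.List.enumerate_nil, pvGView]
  | cons g rest ih =>
    intro front d hsplit hfl
    obtain ⟨p, n, r⟩ := g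
    have hplt : p < tagged.length := by
      have := pvPPN_lt tagged 0 (p, n, r) (by rw [hppN, hsplit]; simp)
      simpa using this
    have hnle : pvNext tagged rest ≤ tagged.length := by
      cases rest with
      | nil => simp [pvNext]
      | cons q rest' =>
        have := pvPPN_lt tagged 0 q (by rw [hppN, hsplit]; simp)
        simp only [pvNext]
        omega
    have hk0 : (((front.length : Nat) : Int) == 0) = false := by
      simp only [beq_eq_false_iff_ne, ne_eq, Int.natCast_eq_zero]
      omega
    have hnext : (if ((front.length : Int)) + 1 < ((ppN.map pvCast).length : Int)
        then (PySem.List.pyGetD (ppN.map pvCast) ((front.length : Int) + 1) (0, "", "")).1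
        else (tagged.length : Int)) = ((pvNext tagged rest : Nat) : Int) := by
      cases rest with
      | nil =>
        rw [if_neg (by rw [hsplit]; simp)]
        simp [pvNext]
      | cons q rest' =>
        have hlen : (ppN.map pvCast).length = front.length + rest'.length + 2 := by
          rw [hsplit]; simp; omega
        rw [if_pos (by rw [hlen]; push_cast; omega)]
        rw [show ((front.length : Int) + 1) = (((front.length + 1 : Nat)) : Int) by push_cast; ring,
          PySem.List.pyGetD_natCast]
        rw [hsplit, List.map_append]
        rw [List.getD_eq_getElem _ _ (by simp)]
        rw [List.getElem_append_right (by simp)]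
        simp [pvCast, pvNext]
    have hstep : pvStepA tagged (ppN.map pvCast) d (((front.length : Nat) : Int), pvCast (p, n, r))
        = pvBuild1 d (n, r, ((tagged.take (pvNext tagged rest)).drop (p + 1)).filterMap pvTextOf) := by
      simp only [pvStepA, pvCast, hk0, Bool.false_eq_true, if_false, hnext]
      rw [show ((p : Int) + 1) = (((p + 1 : Nat)) : Int) by push_cast; ring,
        pvTR tagged (p + 1) (pvNext tagged rest) hnle]
      unfold pvBuild1 pvRif
      by_cases hr : r ≠ "" <;> simp [hr]
    rw [List.map_cons, PySem.List.enumerate_cons, List.foldl_cons, hstep]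
    rw [show ((front.length : Int) + 1) = (((front ++ [(p, n, r)]).length : Nat) : Int) by
      push_cast [List.length_append, List.length_cons, List.length_nil]; ring]
    rw [ih (front ++ [(p, n, r)]) _ (by rw [hsplit]; simp) (by simp)]
    simp [pvGView]

theorem pvLA (tagged : List (String × String × String)) :
    build_province_texts tagged
      = (pvBuildG (pvGroups tagged).1 (pvGroups tagged).2).items := by
  have hpp : pvPP tagged = (pvPPN 0 tagged).map pvCast := by
    have h := pvPP_cast tagged 0
    simpa [pvPP] using h
  rw [pvA_unfold, pvGroups_eq tagged, hpp]
  cases hp : pvPPN 0 tagged with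
  | nil => simp [PySem.List.enumerate_nil, pvGView, pvBuildG]
  | cons g rest =>
    obtain ⟨p0, n0, r0⟩ := g
    have hp0lt : p0 < tagged.length := by
      have := pvPPN_lt tagged 0 (p0, n0, r0) (by rw [hp]; simp)
      simpa using this
    have hnle : pvNext tagged rest ≤ tagged.length := by
      cases rest with
      | nil => simp [pvNext]
      | cons q rest' =>
        have := pvPPN_lt tagged 0 q (by rw [hp]; simp)
        simp only [pvNext]
        omega
    have hins : ∀ (k : String) (v p : List String),
        ((PySem.Dict.empty : PySem.Dict String (List String)).insert k v).modify k []
            (fun l => l ++ p) = PySem.Dict.empty.insert k (v ++ p) :=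
      fun k v p => pv_insert_modify _ _ _ _ PySem.Dict.nodup_keys_empty
    have hnext : (if ((0 : Int)) + 1 < (((((p0 : Int), n0, r0) :: rest.map pvCast).length : Nat) : Int)
        then (PySem.List.pyGetD (((p0 : Int), n0, r0) :: rest.map pvCast) ((0 : Int) + 1) (0, "", "")).1
        else (tagged.length : Int)) = ((pvNext tagged rest : Nat) : Int) := by
      cases rest with
      | nil =>
        rw [if_neg (by simp)]
        simp [pvNext]
      | cons q rest' =>
        rw [if_pos (by simp only [List.length_cons, List.length_map]; push_cast; omega)]
        rw [show ((0 : Int) + 1) = (((1 : Nat)) : Int) by simp, PySem.List.pyGetD_natCast]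
        simp [pvCast, pvNext]
    have h0 : pvGetTextRange tagged 0 (p0 : Int) = (tagged.take p0).filterMap pvTextOf := by
      have h := pvTR tagged 0 p0 (Nat.le_of_lt hp0lt)
      simpa using h
    have hstep0 : pvStepA tagged (pvCast (p0, n0, r0) :: rest.map pvCast) PySem.Dict.empty
          ((0 : Int), pvCast (p0, n0, r0))
        = PySem.Dict.empty.insert n0
            (((tagged.take p0).filterMap pvTextOf)
              ++ (pvRif r0 ++ ((tagged.take (pvNext tagged rest)).drop (p0 + 1)).filterMap pvTextOf)) := by
      simp only [pvStepA, pvCast]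
      rw [hnext]
      rw [show ((p0 : Int) + 1) = (((p0 + 1 : Nat)) : Int) by push_cast; ring,
        pvTR tagged (p0 + 1) (pvNext tagged rest) hnle, h0]
      unfold pvRif
      by_cases hr : r0 ≠ "" <;> simp [hr, hins, PySem.Dict.contains_empty]
    rw [List.map_cons, PySem.List.enumerate_cons, List.foldl_cons, hstep0]
    rw [show ((0 : Int) + 1) = ((([(p0, n0, r0)] : List (Nat × String × String)).length : Nat) : Int) by
      simp]
    rw [← List.map_cons]
    rw [pvLA1 tagged ((p0, n0, r0) :: rest) hp rest [(p0, n0, r0)] _ rfl (by simp)]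
    simp only [pvGView, pvNext, pvBuildG]
    simp [List.append_assoc]

theorem pvLB (tagged : List (String × String × String)) :
    build_province_texts_alt tagged
      = (pvBuildG (pvGroups tagged).1 (pvGroups tagged).2).items := by
  rw [pvB_unfold, pvLB0 tagged [], List.nil_append]

-- ===== VERDICT (by name: the statement is the Claim_ definition above) =====
theorem build_province_texts_spec : Claim_equal_build_province_texts := by
  intro tagged _
  unfold Spec_build_province_texts
  rw [pvLA, pvLB]
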